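-- pv_equiv track=rewrite | github.com/andrabogildea/cci | ch1/2.py | solution
-- ===== SOURCE A (Python) =====
-- def solution(s):
--     end = 0
--     while end < len(s):
--         if s[end] == '\n':
--             break
--         end += 1
--     end -= 1
--     start = 0
--     s = list(s)
--     while start < end:
--         s[start], s[end] = s[end], s[start]
--         start += 1
--         end -= 1
--     return ''.join(s)
-- ===== SOURCE B (Python) =====
-- def solution(s):
--     idx = s.find('\n')
--     if idx == -1:
--         idx = len(s)
--     return s[:idx][::-1] + s[idx:]
-- ===== Notes on version B (the rewrite author's own statement) =====
-- stated objective: simpler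
-- what changed: Replaces A's index-scan while-loop plus two-pointer in-place swap loop with a single find call and a slice reversal of the prefix before the first newline.
import Mathlib
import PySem

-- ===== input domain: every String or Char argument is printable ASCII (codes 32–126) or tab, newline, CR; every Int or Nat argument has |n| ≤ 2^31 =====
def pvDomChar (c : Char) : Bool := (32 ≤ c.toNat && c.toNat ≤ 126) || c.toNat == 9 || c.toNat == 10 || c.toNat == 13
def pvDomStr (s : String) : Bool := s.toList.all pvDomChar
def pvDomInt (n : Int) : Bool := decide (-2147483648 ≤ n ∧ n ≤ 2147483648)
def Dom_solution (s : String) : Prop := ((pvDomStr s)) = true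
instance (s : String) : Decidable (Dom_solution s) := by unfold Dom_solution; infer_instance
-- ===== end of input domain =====

-- B replaces A's index-scan loop and two-pointer swap loop with a single find plus a slice reversal of the prefix; objective: simpler.

-- ===== PORT A =====
-- while end < len(s): if s[end] == '\n': break; end += 1
def findEnd (cs : List Char) (e : Nat) : Nat :=
  if h : e < cs.length then
    if cs[e] = '\n' then e else findEnd cs (e + 1)
  else e
termination_by cs.length - e

-- while start < end: s[start], s[end] = s[end], s[start]; start += 1; end -= 1
-- (indexing via getD: whenever the loop body runs in A both indices are in range, so getD is exact)
def swapLoop (cs : List Char) (start e : Int) : List Char :=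
  if h : start < e then
    swapLoop ((cs.set start.toNat (cs.getD e.toNat ' ')).set e.toNat (cs.getD start.toNat ' '))
      (start + 1) (e - 1)
  else cs
termination_by (e - start).toNat
decreasing_by simp; omega

def solution (s : String) : String :=
  let cs := s.toList
  String.ofList (swapLoop cs 0 ((findEnd cs 0 : Int) - 1))

-- ===== PORT B =====
def solution_alt (s : String) : String :=
  let idx := PySem.Str.find s "\n"
  let idx := if idx = -1 then PySem.Str.len s else idx
  String.ofList (((PySem.List.slice? (PySem.List.slice s.toList none (some idx)) none none (-1)).getD [])
    ++ PySem.List.slice s.toList (some idx) none)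

-- ===== PRECONDITION & SPEC =====
def Spec_solution (s : String) (out : String) : Prop := out = solution_alt s
instance (s : String) (out : String) : Decidable (Spec_solution s out) := by unfold Spec_solution; infer_instance

-- ===== CLAIM (what is proved, stated in full; the proofs are below) =====
def Claim_equal_solution : Prop := ∀ (s : String), Dom_solution s → Spec_solution s (solution s)

-- ===== LEMMAS AND PROOFS =====

-- A's scan returns the index of the first '\n' at or after e (or the length if none)
theorem findEnd_eq (cs : List Char) (e : Nat) (he : e ≤ cs.length) :
    findEnd cs e = e + (cs.drop e).findIdx (fun c => c == '\n') := by
  induction e using findEnd.induct cs with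
  | case1 e h hnl =>
    rw [findEnd]
    simp [h, hnl, List.drop_eq_getElem_cons h, List.findIdx_cons]
  | case2 e h hnl ih =>
    rw [findEnd, dif_pos h, if_neg hnl, ih (by omega),
      List.drop_eq_getElem_cons h, List.findIdx_cons]
    have : (cs[e] == '\n') = false := by simp [hnl]
    rw [this]
    simp; omega
  | case3 e h =>
    rw [findEnd]
    have : e = cs.length := by omega
    simp [this]

-- PySem's find scanner on the one-char pattern '\n' is findIdx (or -1 if absent)
theorem findgo_eq (cs : List Char) : ∀ (k : Nat),
    PySem.Chars.find.go ['\n'] cs k =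
      if '\n' ∈ cs then ((k + cs.findIdx (fun c => c == '\n') : Nat) : Int) else -1 := by
  induction cs with
  | nil => intro k; simp [PySem.Chars.find.go]
  | cons x t ih =>
    intro k
    by_cases hx : x = '\n'
    · subst hx; simp [PySem.Chars.find.go, List.isPrefixOf, List.findIdx_cons]
    · have hb : (x == '\n') = false := by simp [hx]
      simp only [PySem.Chars.find.go, List.isPrefixOf, hb,
        List.findIdx_cons, List.mem_cons, ih (k + 1)]
      by_cases hm : '\n' ∈ t
      · simp [hm, Ne.symm hx]
        omega
      · simp [hm, Ne.symm hx]

theorem findIdx_eq_length_of_not_mem (l : List Char) (h : '\n' ∉ l) :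
    l.findIdx (fun c => c == '\n') = l.length := by
  induction l with
  | nil => rfl
  | cons x t ih =>
    simp at h
    have hb : (x == '\n') = false := by simp; exact fun h' => h.1 h'.symm
    simp [List.findIdx_cons, hb, ih h.2]

-- the two-pointer swap loop reverses exactly the segment it walks over
theorem swapLoop_seg : ∀ (n : Nat) (mid : List Char), mid.length = n → ∀ (pre suf : List Char),
    swapLoop (pre ++ mid ++ suf) (pre.length : Int) ((pre.length : Int) + mid.length - 1)
      = pre ++ mid.reverse ++ suf := by
  intro n
  induction n using Nat.strongRecOn with
  | _ n ih =>
    intro mid hlen pre suf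
    rcases mid with _ | ⟨a, _ | ⟨c, rest⟩⟩
    · rw [swapLoop]; simp
    · rw [swapLoop]; simp
    obtain hnil | ⟨ms, b, hmb⟩ := (c :: rest).eq_nil_or_concat
    · simp at hnil
    have hmb' : c :: rest = ms ++ [b] := by simpa [List.concat_eq_append] using hmb
    rw [hmb'] at hlen ⊢
    have hms : ms.length + 2 = n := by simpa using hlen
    rw [swapLoop]
    have hlt : (pre.length : Int) < (pre.length : Int) + (a :: (ms ++ [b])).length - 1 := by
      simp; omega
    rw [dif_pos hlt]
    have h1 : ((pre.length : Int)).toNat = pre.length := by omega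
    have h2 : ((pre.length : Int) + (a :: (ms ++ [b])).length - 1).toNat = pre.length + (ms.length + 1) := by
      simp; omega
    rw [h1, h2]
    have hcs : pre ++ (a :: (ms ++ [b])) ++ suf = pre ++ a :: ms ++ b :: suf := by simp
    rw [hcs]
    have hgb : (pre ++ a :: ms ++ b :: suf).getD (pre.length + (ms.length + 1)) ' ' = b := by
      have : pre ++ a :: ms ++ b :: suf = (pre ++ a :: ms) ++ b :: suf := by simp
      rw [this]
      have hl : pre.length + (ms.length + 1) = (pre ++ a :: ms).length := by simp
      rw [hl]
      simp [List.getD]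
    have hga : (pre ++ a :: ms ++ b :: suf).getD pre.length ' ' = a := by
      simp [List.getD]
    rw [hgb, hga]
    have hset1 : (pre ++ a :: ms ++ b :: suf).set pre.length b = pre ++ b :: ms ++ b :: suf := by
      simp
    rw [hset1]
    have hset2 : (pre ++ b :: ms ++ b :: suf).set (pre.length + (ms.length + 1)) a
        = pre ++ b :: ms ++ a :: suf := by
      have : pre ++ b :: ms ++ b :: suf = (pre ++ b :: ms) ++ b :: suf := by simp
      rw [this]
      have hl : pre.length + (ms.length + 1) = (pre ++ b :: ms).length := by simp
      rw [hl]
      simp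
    rw [hset2]
    have hre : pre ++ b :: ms ++ a :: suf = (pre ++ [b]) ++ ms ++ (a :: suf) := by simp
    have harg1 : (pre.length : Int) + 1 = ((pre ++ [b]).length : Int) := by simp
    have harg2 : (pre.length : Int) + (a :: (ms ++ [b])).length - 1 - 1
        = ((pre ++ [b]).length : Int) + ms.length - 1 := by simp; omega
    rw [hre, harg1, harg2, ih ms.length (by omega) ms rfl]
    simp

-- A's loops compute reverse-prefix-before-first-newline
theorem swapLoop_reverse_take (cs : List Char) (k : Nat) (hk : k ≤ cs.length) :
    swapLoop cs 0 ((k : Int) - 1) = (cs.take k).reverse ++ cs.drop k := by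
  rcases Nat.eq_zero_or_pos k with hz | hp
  · subst hz
    rw [swapLoop]
    simp
  · have := swapLoop_seg (cs.take k).length (cs.take k) rfl [] (cs.drop k)
    simp only [List.nil_append, List.length_nil, Nat.cast_zero, List.length_take] at this
    have hmin : min k cs.length = k := by omega
    rw [hmin] at this
    have : swapLoop cs 0 ((k : Int) - 1) = (cs.take k).reverse ++ cs.drop k := by
      rw [← List.take_append_drop k cs] at this ⊢
      convert this using 2 <;> simp
    exact this

-- ===== VERDICT (by name: the statement is the Claim_ definition above) =====
theorem solution_spec : Claim_equal_solution := by
  unfold Claim_equal_solution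
  intro s _
  unfold Spec_solution solution solution_alt
  simp only []
  set cs := s.toList with hcs
  have hnl : ("\n" : String).toList = ['\n'] := rfl
  set k : Nat := cs.findIdx (fun c => c == '\n') with hk
  have hkle : k ≤ cs.length := List.findIdx_le_length
  -- B's idx is (k : Int) in both branches
  have hidx : (if PySem.Str.find s "\n" = -1 then PySem.Str.len s else PySem.Str.find s "\n")
      = (k : Int) := by
    rw [PySem.Str.find, hnl, PySem.Chars.find, findgo_eq, ← hcs]
    by_cases hm : '\n' ∈ cs
    · simp [hm, ← hk]
    · simp [hm, PySem.Str.len, ← hcs, hk, findIdx_eq_length_of_not_mem cs hm]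
  -- A's end index is k
  have hfe : findEnd cs 0 = k := by
    rw [findEnd_eq cs 0 (by omega)]
    simp [hk]
  rw [hfe, hidx, swapLoop_reverse_take cs k hkle,
    PySem.List.slice_to _ (by positivity), PySem.List.slice_from _ (by positivity),
    PySem.List.slice?_none_none_neg_one]
  simp
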